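-- pv_equiv track=rewrite | github.com/cadenzasong/CarND-Capstone | ros/src/common_helpers/common_helpers/util.py | circular_slice
-- ===== SOURCE A (Python) =====
-- def circular_slice(arr, from_, n):
--     """
--     arr: array
--     from_: starting index
--     n: how many elements you want
--     """
--     assert from_ >= 0 and from_ < len(arr)
--     res = []
--     while n > 0:
--         k = min(n, len(arr) - from_)
--         res += arr[from_:from_ + n]
--         n -= k
--         from_ = 0
--     return res
-- ===== SOURCE B (Python) =====
-- def circular_slice(arr, from_, n):
--     """
--     arr: array
--     from_: starting index
--     n: how many elements you want
--     """
--     assert from_ >= 0 and from_ < len(arr)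
--     return [arr[(from_ + i) % len(arr)] for i in range(n)]
-- ===== Notes on version B (the rewrite author's own statement) =====
-- stated objective: simpler
-- what changed: Replaces the chunk-copying while loop that mutates from_/n and concatenates wrap-around slices with a single comprehension mapping each output position i to source index (from_+i) % len(arr).
import Mathlib
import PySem

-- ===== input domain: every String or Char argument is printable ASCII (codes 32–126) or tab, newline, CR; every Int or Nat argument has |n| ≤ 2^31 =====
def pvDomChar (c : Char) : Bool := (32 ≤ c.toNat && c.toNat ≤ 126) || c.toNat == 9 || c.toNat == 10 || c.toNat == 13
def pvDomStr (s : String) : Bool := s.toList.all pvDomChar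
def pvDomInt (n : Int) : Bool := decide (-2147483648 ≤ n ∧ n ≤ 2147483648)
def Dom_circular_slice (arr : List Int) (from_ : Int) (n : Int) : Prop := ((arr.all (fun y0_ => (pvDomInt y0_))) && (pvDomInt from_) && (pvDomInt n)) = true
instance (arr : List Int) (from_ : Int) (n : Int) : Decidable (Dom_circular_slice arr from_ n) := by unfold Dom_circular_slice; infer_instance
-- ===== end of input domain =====

-- B replaces A's chunk-copying while loop with a single per-element modular-index map (simpler; same cost).


-- ===== PORT A =====
-- A's while loop; fuel = n.toNat only guards termination (each pass removes at least one element inside Pre_).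
def circAux (arr : List Int) : Nat → Int → Int → List Int → List Int
  | 0, _, _, res => res
  | fuel+1, from_, n, res =>
    if n > 0 then
      let k := min n ((arr.length : Int) - from_)
      circAux arr fuel 0 (n - k) (res ++ PySem.List.slice arr (some from_) (some (from_ + n)))
    else res

def circular_slice (arr : List Int) (from_ : Int) (n : Int) : List Int :=
  if 0 ≤ from_ ∧ from_ < (arr.length : Int) then  -- the assert; inputs failing it are outside Pre_
    circAux arr n.toNat from_ n []
  else []

-- ===== PORT B =====
def circular_slice_alt (arr : List Int) (from_ : Int) (n : Int) : List Int :=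
  if 0 ≤ from_ ∧ from_ < (arr.length : Int) then  -- the assert; inputs failing it are outside Pre_
    (PySem.List.pyRange 0 n 1).map
      (fun i => PySem.List.pyGetD arr (PySem.Int.mod (from_ + i) (arr.length : Int)) 0)
  else []

-- ===== PRECONDITION & SPEC =====
-- Pre_ excludes exactly the inputs on which A's assert fails (AssertionError): from_ out of [0, len(arr)).
def Pre_circular_slice (arr : List Int) (from_ : Int) (_n : Int) : Prop :=
  0 ≤ from_ ∧ from_ < (arr.length : Int)
instance (arr : List Int) (from_ : Int) (n : Int) : Decidable (Pre_circular_slice arr from_ n) := by unfold Pre_circular_slice; infer_instance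

def pvWitness_circular_slice : List Int × Int × Int := ([1, 2, 3], 1, 5)

def Spec_circular_slice (arr : List Int) (from_ : Int) (n : Int) (out : List Int) : Prop := out = circular_slice_alt arr from_ n
instance (arr : List Int) (from_ : Int) (n : Int) (out : List Int) : Decidable (Spec_circular_slice arr from_ n out) := by unfold Spec_circular_slice; infer_instance

-- ===== CLAIM (what is proved, stated in full; the proofs are below) =====
def Claim_equal_circular_slice : Prop := ∀ (arr : List Int) (from_ : Int) (n : Int), Dom_circular_slice arr from_ n → Pre_circular_slice arr from_ n → Spec_circular_slice arr from_ n (circular_slice arr from_ n)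

-- ===== LEMMAS AND PROOFS =====

-- canonical Nat-level description of the circular slice
def circSpec (arr : List Int) (f m : Nat) : List Int :=
  (List.range m).map (fun k => arr.getD ((f + k) % arr.length) 0)

lemma alt_eq_circSpec (arr : List Int) (from_ n : Int)
    (h0 : 0 ≤ from_) (h1 : from_ < (arr.length : Int)) :
    circular_slice_alt arr from_ n = circSpec arr from_.toNat n.toNat := by
  have hL : (0:Int) < arr.length := by omega
  unfold circular_slice_alt circSpec
  rw [if_pos ⟨h0, h1⟩, PySem.List.pyRange_one, List.map_map]
  rw [show ((n - 0).toNat = n.toNat) by omega]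
  apply List.map_congr_left
  intro k hk
  have hmod : PySem.Int.mod (from_ + (0 + (k:Int))) (arr.length : Int)
      = (((from_.toNat + k) % arr.length : Nat) : Int) := by
    rw [PySem.Int.mod_eq_emod_of_pos hL]
    conv_lhs => rw [← Int.toNat_of_nonneg h0]
    push_cast
    ring_nf
  simp only [Function.comp, hmod, PySem.List.pyGetD_natCast]

lemma circSpec_step (arr : List Int) (f m : Nat) (hf : f < arr.length) :
    (arr.drop f).take m ++ circSpec arr 0 (m - min m (arr.length - f)) = circSpec arr f m := by
  have hL : 0 < arr.length := Nat.lt_of_le_of_lt (Nat.zero_le f) hf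
  apply List.ext_getElem
  · simp [circSpec]
  intro i hi1 hi2
  simp only [circSpec, List.length_map, List.length_range] at hi2
  rw [List.getElem_append]
  split
  · rename_i hlt
    simp only [List.length_take, List.length_drop] at hlt
    have hfi : f + i < arr.length := by omega
    simp only [circSpec, List.getElem_take, List.getElem_drop, List.getElem_map, List.getElem_range]
    rw [Nat.mod_eq_of_lt hfi, List.getD_eq_getElem arr 0 hfi]
  · rename_i hge
    simp only [List.length_take, List.length_drop] at hge
    simp only [circSpec, List.getElem_map, List.getElem_range, List.length_take, List.length_drop, Nat.zero_add]
    have harg : f + i = arr.length + (i - min m (arr.length - f)) := by omega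
    rw [harg, Nat.add_mod_left]

lemma circAux_eq (arr : List Int) (fuel : Nat) :
    ∀ (from_ n : Int) (res : List Int), 0 ≤ from_ → from_ < (arr.length : Int) →
      n.toNat ≤ fuel →
      circAux arr fuel from_ n res = res ++ circSpec arr from_.toNat n.toNat := by
  induction fuel with
  | zero =>
    intro from_ n res h0 h1 hle
    have h : n.toNat = 0 := by omega
    simp [circAux, circSpec, h]
  | succ fuel ih =>
    intro from_ n res h0 h1 hle
    by_cases hn : n > 0
    · have hL : (0:Int) < arr.length := by omega
      have hrec : (n - min n ((arr.length : Int) - from_)).toNat ≤ fuel := by omega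
      simp only [circAux, if_pos hn]
      rw [ih 0 (n - min n ((arr.length : Int) - from_)) _ le_rfl hL hrec]
      rw [List.append_assoc]
      congr 1
      have hf : from_.toNat < arr.length := by omega
      have e1 : (n - min n ((arr.length : Int) - from_)).toNat
          = n.toNat - min n.toNat (arr.length - from_.toNat) := by omega
      have e2 : PySem.List.slice arr (some from_) (some (from_ + n))
          = (arr.drop from_.toNat).take n.toNat := by
        rw [show from_ = (from_.toNat : Int) by omega, show n = (n.toNat : Int) by omega]
        exact PySem.List.slice_natCast_add arr from_.toNat n.toNat
      rw [Int.toNat_zero, e1, e2, circSpec_step arr from_.toNat n.toNat hf]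
    · have h : n.toNat = 0 := by omega
      simp [circAux, if_neg hn, circSpec, h]

-- ===== VERDICT (by name: the statement is the Claim_ definition above) =====
theorem circular_slice_spec : Claim_equal_circular_slice := by
  intro arr from_ n _ hpre
  obtain ⟨h0, h1⟩ := hpre
  unfold Spec_circular_slice circular_slice
  rw [if_pos ⟨h0, h1⟩, circAux_eq arr n.toNat from_ n [] h0 h1 le_rfl,
    alt_eq_circSpec arr from_ n h0 h1, List.nil_append]
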